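-- pv_equiv track=rewrite | github.com/mack1210/Programmers | 5. 완전탐색_모의고사.py | solution
-- ===== SOURCE A (Python) =====
-- def solution(answers):
--     import math
--
--     n = len(answers)
--     patterns = [[1, 2, 3, 4, 5], [2, 1, 2, 3, 2, 4, 2, 5], [3, 3, 1, 1, 2, 2, 4, 4, 5, 5]]
--
--     lst = []
--     T = len(patterns)
--     for t in range(T):
--         pattern = patterns[t]
--         p = len(answers) / len(pattern)
--         if p > 1:
--             ex = lambda x: x*(math.ceil(p))
--             pattern = ex(pattern)[:n]
--         elif p < 1:
--             pattern = pattern[:n]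
--
--         cnt = 0
--         for x, y in zip(pattern, answers):
--             if x == y:
--                 cnt += 1
--
--         lst.append(cnt)
--
--     answers = []
--     for i in range(T):
--         if lst[i] == max(lst):
--             answers.append(i+1)
--
--     return answers
-- ===== SOURCE B (Python) =====
-- def solution(answers):
--     p1 = [1, 2, 3, 4, 5]
--     p2 = [2, 1, 2, 3, 2, 4, 2, 5]
--     p3 = [3, 3, 1, 1, 2, 2, 4, 4, 5, 5]
--     c1 = c2 = c3 = 0
--     for i, a in enumerate(answers):
--         if a == p1[i % 5]:
--             c1 += 1
--         if a == p2[i % 8]: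
--             c2 += 1
--         if a == p3[i % 10]:
--             c3 += 1
--     m = max(c1, c2, c3)
--     res = []
--     if c1 == m:
--         res.append(1)
--     if c2 == m:
--         res.append(2)
--     if c3 == m:
--         res.append(3)
--     return res
-- ===== Notes on version B (the rewrite author's own statement) =====
-- stated objective: idiomatic
-- what changed: Replaces the outer loop over patterns that materializes each pattern extended/truncated to len(answers) (ceil-division repetition plus slicing, then a zip count per pattern) by one single pass over answers keeping three running counters compared via modulo indexing into the fixed patterns, then a direct max and three membership tests.
import Mathlib
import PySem

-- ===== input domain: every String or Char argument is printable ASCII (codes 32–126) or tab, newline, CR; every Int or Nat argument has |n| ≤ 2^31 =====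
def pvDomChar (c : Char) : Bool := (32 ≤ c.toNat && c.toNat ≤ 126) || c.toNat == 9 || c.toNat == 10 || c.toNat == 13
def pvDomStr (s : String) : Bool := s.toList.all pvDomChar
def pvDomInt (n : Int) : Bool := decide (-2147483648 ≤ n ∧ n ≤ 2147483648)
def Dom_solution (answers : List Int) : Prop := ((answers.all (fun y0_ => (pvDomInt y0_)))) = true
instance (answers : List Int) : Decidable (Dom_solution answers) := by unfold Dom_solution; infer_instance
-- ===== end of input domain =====

-- B replaces A's per-pattern materialization of an extended pattern (ceil-division repetition + slice, then a zip count
-- for each of the three patterns) by a single pass over answers with three modulo-indexed running counters (objective: idiomatic).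

-- ===== PORT A =====
-- Transliteration of A. Notes on exactness: Python's float comparison `len(answers)/len(pattern) > 1` (resp. `< 1`) holds
-- iff `len(pattern) < len(answers)` (resp. `>`) since float division of ints of this size is > 1 / < 1 exactly when the
-- exact ratio is; `math.ceil(p)` equals Nat ceiling division (n + L - 1) / L there (exact: IEEE division of ints below 2^52
-- never rounds across an integer); `xs[:n]` with n = len(answers) ≥ 0 is List.take n.
def solution (answers : List Int) : List Int :=
  let n := answers.length
  let patterns : List (List Int) := [[1, 2, 3, 4, 5], [2, 1, 2, 3, 2, 4, 2, 5], [3, 3, 1, 1, 2, 2, 4, 4, 5, 5]]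
  let lst : List Int := patterns.foldl (fun lst pattern0 =>
    let pattern :=
      if pattern0.length < n then
        (PySem.List.pyRepeat pattern0 ((n + pattern0.length - 1) / pattern0.length : Nat)).take n
      else if n < pattern0.length then
        pattern0.take n
      else pattern0
    let cnt := (pattern.zip answers).foldl (fun cnt xy => if xy.1 = xy.2 then cnt + 1 else cnt) (0 : Int)
    lst ++ [cnt]) []
  (PySem.List.pyRange 0 3 1).foldl (fun acc i =>
    if PySem.List.pyGetD lst i 0 = (PySem.List.max? lst (fun x => x)).getD 0 then acc ++ [i + 1] else acc) []

-- ===== PORT B =====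
def solution_alt (answers : List Int) : List Int :=
  let p1 : List Int := [1, 2, 3, 4, 5]
  let p2 : List Int := [2, 1, 2, 3, 2, 4, 2, 5]
  let p3 : List Int := [3, 3, 1, 1, 2, 2, 4, 4, 5, 5]
  let cs := (PySem.List.enumerate answers 0).foldl
    (fun (s : Int × Int × Int) ia =>
      ((if ia.2 = PySem.List.pyGetD p1 (PySem.Int.mod ia.1 5) 0 then s.1 + 1 else s.1),
       (if ia.2 = PySem.List.pyGetD p2 (PySem.Int.mod ia.1 8) 0 then s.2.1 + 1 else s.2.1),
       (if ia.2 = PySem.List.pyGetD p3 (PySem.Int.mod ia.1 10) 0 then s.2.2 + 1 else s.2.2)))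
    ((0 : Int), (0 : Int), (0 : Int))
  let m := max (max cs.1 cs.2.1) cs.2.2
  (if cs.1 = m then [1] else []) ++ (if cs.2.1 = m then [2] else []) ++ (if cs.2.2 = m then [3] else [])

-- ===== PRECONDITION & SPEC =====
def Spec_solution (answers : List Int) (out : List Int) : Prop := out = solution_alt answers
instance (answers : List Int) (out : List Int) : Decidable (Spec_solution answers out) := by unfold Spec_solution; infer_instance

-- ===== CLAIM (what is proved, stated in full; the proofs are below) =====
def Claim_equal_solution : Prop := ∀ (answers : List Int), Dom_solution answers → Spec_solution answers (solution answers)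

-- ===== LEMMAS AND PROOFS =====

-- The common value of both counting loops: matches of ans against pat cycled from position k.
def gcount (pat : List Int) (k : Nat) (ans : List Int) : Int :=
  match ans with
  | [] => 0
  | a :: t => (if pat.getD (k % pat.length) 0 = a then 1 else 0) + gcount pat (k + 1) t

-- A's zip-count loop, named for the lemmas.
def zc (ext ans : List Int) (c : Int) : Int :=
  (ext.zip ans).foldl (fun cnt xy => if xy.1 = xy.2 then cnt + 1 else cnt) c

theorem zc_take (ans : List Int) : ∀ (ext : List Int) (n : Nat) (c : Int),
    ans.length ≤ n → zc (ext.take n) ans c = zc ext ans c := by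
  induction ans with
  | nil => intro ext n c _; simp [zc]
  | cons a t ih =>
    intro ext n c h
    cases ext with
    | nil => simp [zc]
    | cons x xt =>
      cases n with
      | zero => simp at h
      | succ n' =>
        simp only [List.take_succ_cons, zc, List.zip_cons_cons, List.foldl_cons]
        exact ih xt n' _ (by simpa using h)

theorem pyRepeat_succ {α : Type} (xs : List α) (m : Nat) :
    PySem.List.pyRepeat xs ((m + 1 : Nat) : Int) = xs ++ PySem.List.pyRepeat xs (m : Int) := by
  simp [PySem.List.pyRepeat, List.replicate_succ]

theorem gcount_congr (pat : List Int) : ∀ (ans : List Int) (k k' : Nat),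
    k % pat.length = k' % pat.length → gcount pat k ans = gcount pat k' ans := by
  intro ans
  induction ans with
  | nil => intros; simp [gcount]
  | cons a t ih =>
    intro k k' h
    simp only [gcount, h]
    congr 1
    exact ih (k + 1) (k' + 1) (by rw [Nat.add_mod, Nat.add_mod k' 1, h])

theorem zc_gcount (pat : List Int) (hL : 0 < pat.length) : ∀ (ans : List Int) (r m : Nat) (c : Int),
    r < pat.length → ans.length ≤ (pat.length - r) + m * pat.length →
    zc (pat.drop r ++ PySem.List.pyRepeat pat (m : Int)) ans c = c + gcount pat r ans := by
  intro ans
  induction ans with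
  | nil => intros; simp [zc, gcount]
  | cons a t ih =>
    intro r m c hr hlen
    rw [List.drop_eq_getElem_cons hr]
    simp only [List.cons_append, zc, List.zip_cons_cons, List.foldl_cons]
    have hstep : gcount pat r (a :: t) = (if pat[r] = a then 1 else 0) + gcount pat (r + 1) t := by
      simp [gcount, Nat.mod_eq_of_lt hr, List.getD_eq_getElem?_getD, List.getElem?_eq_getElem hr]
    rw [hstep]
    by_cases hcase : r + 1 < pat.length
    · have ht : List.foldl (fun cnt xy => if xy.1 = xy.2 then cnt + 1 else cnt)
          (if pat[r] = a then c + 1 else c) ((List.drop (r + 1) pat ++ PySem.List.pyRepeat pat (m : Int)).zip t)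
          = (if pat[r] = a then c + 1 else c) + gcount pat (r + 1) t :=
        ih (r + 1) m _ hcase (by simp at hlen; omega)
      rw [ht]
      by_cases hx : pat[r] = a <;> simp [hx] <;> try ring
    · -- r + 1 = pat.length : the dropped suffix is exhausted, continue into the repetitions
      have hrL : r + 1 = pat.length := by omega
      have hdrop : List.drop (r + 1) pat = ([] : List Int) := by simp [hrL]
      have hg : gcount pat (r + 1) t = gcount pat 0 t :=
        gcount_congr pat t (r + 1) 0 (by simp [hrL])
      cases t with
      | nil => simp [List.zip_nil_right, gcount]; by_cases hx : pat[r] = a <;> simp [hx]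
      | cons b t' =>
        have hm : 0 < m := by
          rcases Nat.eq_zero_or_pos m with h0 | h
          · subst h0; simp at hlen; omega
          · exact h
        obtain ⟨m', rfl⟩ : ∃ m', m = m' + 1 := ⟨m - 1, by omega⟩
        rw [hdrop, List.nil_append, show ((m' + 1 : Nat) : Int) = (((m' + 1 : Nat)) : Int) from rfl,
          pyRepeat_succ pat m']
        have ht : List.foldl (fun cnt xy => if xy.1 = xy.2 then cnt + 1 else cnt)
            (if pat[r] = a then c + 1 else c) ((pat ++ PySem.List.pyRepeat pat (m' : Int)).zip (b :: t'))
            = (if pat[r] = a then c + 1 else c) + gcount pat 0 (b :: t') := by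
          have hexp : (m' + 1) * pat.length = pat.length + m' * pat.length := by ring
          have := ih 0 m' (if pat[r] = a then c + 1 else c) hL
            (by simp only [List.length_cons] at hlen ⊢; omega)
          simpa [zc] using this
        rw [ht, hg]
        by_cases hx : pat[r] = a <;> simp [hx] <;> try ring

-- A's whole per-pattern body equals the cyclic count from 0.
theorem ext_count (pat ans : List Int) (hL : 0 < pat.length) :
    zc (if pat.length < ans.length then
          (PySem.List.pyRepeat pat ((ans.length + pat.length - 1) / pat.length : Nat)).take ans.length
        else if ans.length < pat.length then pat.take ans.length else pat) ans 0
      = gcount pat 0 ans := by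
  split_ifs with h1 h2
  · -- len(answers) > len(pattern) : repetition then truncation
    rw [zc_take ans _ ans.length 0 le_rfl]
    have hm : 0 < (ans.length + pat.length - 1) / pat.length := Nat.div_pos (by omega) hL
    obtain ⟨m', hm'⟩ : ∃ m', (ans.length + pat.length - 1) / pat.length = m' + 1 :=
      ⟨(ans.length + pat.length - 1) / pat.length - 1, by omega⟩
    have hdm : pat.length * (m' + 1) + (ans.length + pat.length - 1) % pat.length
        = ans.length + pat.length - 1 := by rw [← hm']; exact Nat.div_add_mod _ _
    have hexp : pat.length * (m' + 1) = pat.length * m' + pat.length := by ring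
    have hcomm : m' * pat.length = pat.length * m' := Nat.mul_comm _ _
    have hmod : (ans.length + pat.length - 1) % pat.length < pat.length := Nat.mod_lt _ hL
    have hexp2 : (m' + 1) * pat.length = pat.length * m' + pat.length := by ring
    rw [hm', pyRepeat_succ pat m']
    have := zc_gcount pat hL ans 0 m' 0 hL (by omega)
    simpa using this
  · -- len(answers) < len(pattern) : truncation only
    rw [zc_take ans pat ans.length 0 le_rfl]
    have := zc_gcount pat hL ans 0 0 0 hL (by omega)
    simpa [PySem.List.pyRepeat] using this
  · -- equal lengths
    have heq : ans.length = pat.length := by omega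
    have := zc_gcount pat hL ans 0 0 0 hL (by omega)
    simpa [PySem.List.pyRepeat] using this

-- B's single enumerate fold computes the same cyclic count (one counter at a time).
theorem bfold_gcount (pat : List Int) (d : Int) (hd : d = (pat.length : Int)) :
    ∀ (ans : List Int) (k : Nat) (c : Int),
    (PySem.List.enumerate ans (k : Int)).foldl
      (fun c (ia : Int × Int) => if ia.2 = PySem.List.pyGetD pat (PySem.Int.mod ia.1 d) 0 then c + 1 else c) c
      = c + gcount pat k ans := by
  intro ans
  induction ans with
  | nil => intros; simp [PySem.List.enumerate_nil, gcount]
  | cons a t ih =>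
    intro k c
    rw [PySem.List.enumerate_cons]
    simp only [List.foldl_cons]
    have hidx : PySem.List.pyGetD pat (PySem.Int.mod (k : Int) d) 0 = pat.getD (k % pat.length) 0 := by
      rw [hd, PySem.Int.mod_natCast, PySem.List.pyGetD_natCast]
    have hk1 : ((k : Int) + 1) = ((k + 1 : Nat) : Int) := by push_cast; ring
    rw [hk1, ih (k + 1)]
    simp only [gcount, hidx]
    by_cases hx : a = (pat[k % pat.length]?).getD 0
    · simp [List.getD, hx]; ring
    · simp [List.getD, hx, Ne.symm hx]

-- ===== VERDICT (by name: the statement is the Claim_ definition above) =====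
theorem solution_spec : Claim_equal_solution := by
  intro answers _
  unfold Spec_solution solution solution_alt
  simp only [List.foldl_cons, List.foldl_nil, List.nil_append]
  -- A's three per-pattern counts are the cyclic counts
  have e1 := ext_count [1, 2, 3, 4, 5] answers (by simp)
  have e2 := ext_count [2, 1, 2, 3, 2, 4, 2, 5] answers (by simp)
  have e3 := ext_count [3, 3, 1, 1, 2, 2, 4, 4, 5, 5] answers (by simp)
  simp only [zc] at e1 e2 e3
  simp only [e1, e2, e3]
  -- B's one fold with three accumulators is three folds
  rw [PySem.List.foldl_prod_mk
        (f := fun (c : Int) (ia : Int × Int) =>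
          if ia.2 = PySem.List.pyGetD [1, 2, 3, 4, 5] (PySem.Int.mod ia.1 5) 0 then c + 1 else c)
        (g := fun (s2 : Int × Int) (ia : Int × Int) =>
          ((if ia.2 = PySem.List.pyGetD [2, 1, 2, 3, 2, 4, 2, 5] (PySem.Int.mod ia.1 8) 0 then s2.1 + 1 else s2.1),
           (if ia.2 = PySem.List.pyGetD [3, 3, 1, 1, 2, 2, 4, 4, 5, 5] (PySem.Int.mod ia.1 10) 0 then s2.2 + 1 else s2.2)))]
  rw [PySem.List.foldl_prod_mk
        (f := fun (c : Int) (ia : Int × Int) =>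
          if ia.2 = PySem.List.pyGetD [2, 1, 2, 3, 2, 4, 2, 5] (PySem.Int.mod ia.1 8) 0 then c + 1 else c)
        (g := fun (c : Int) (ia : Int × Int) =>
          if ia.2 = PySem.List.pyGetD [3, 3, 1, 1, 2, 2, 4, 4, 5, 5] (PySem.Int.mod ia.1 10) 0 then c + 1 else c)]
  have b1 := bfold_gcount [1, 2, 3, 4, 5] 5 (by norm_num) answers 0 0
  have b2 := bfold_gcount [2, 1, 2, 3, 2, 4, 2, 5] 8 (by norm_num) answers 0 0
  have b3 := bfold_gcount [3, 3, 1, 1, 2, 2, 4, 4, 5, 5] 10 (by norm_num) answers 0 0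
  simp only [Nat.cast_zero, zero_add] at b1 b2 b3
  simp only [b1, b2, b3]
  generalize gcount [1, 2, 3, 4, 5] 0 answers = g1
  generalize gcount [2, 1, 2, 3, 2, 4, 2, 5] 0 answers = g2
  generalize gcount [3, 3, 1, 1, 2, 2, 4, 4, 5, 5] 0 answers = g3
  have hr : PySem.List.pyRange 0 3 1 = [0, 1, 2] := by decide
  rw [hr]
  simp only [List.cons_append, List.nil_append,
    List.foldl_cons, List.foldl_nil, PySem.List.max?_id_cons, Option.getD_some,
    PySem.List.pyGetD_ofNat']
  norm_num [List.getD]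
  split_ifs <;> simp
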